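-- pv_equiv track=rewrite | github.com/pietrobarbiero/pytorch_explain | torch_explain/logic/metrics.py | _generate_consistency_dict
-- ===== SOURCE A (Python) =====
-- from typing import List, Tuple
--
-- def _generate_consistency_dict(formula_list: List[str]) -> dict:
--     concept_dict = {}
--     for i, formula in enumerate(formula_list):
--         concept_dict_i = {}
--         for minterm_list in formula.split(' | '):
--             for term in minterm_list.split(' & '):
--                 concept = term.replace('(', '').replace(')', '').replace('~', '')
--                 if concept in concept_dict_i:
--                     continue
--                 elif concept in concept_dict:
--                     concept_dict_i[concept] = 1
--                     concept_dict[concept] += 1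
--                 else:
--                     concept_dict_i[concept] = 1
--                     concept_dict[concept] = 1
--     return concept_dict
-- ===== SOURCE B (Python) =====
-- def _generate_consistency_dict(formula_list):
--     # Phase 1: clean tokens per formula.
--     token_lists = [[term.replace('(', '').replace(')', '').replace('~', '')
--                     for minterm in formula.split(' | ')
--                     for term in minterm.split(' & ')]
--                    for formula in formula_list]
--     # Phase 2: global first-appearance order of concepts.
--     order = []
--     for tokens in token_lists:
--         for c in tokens:
--             if c not in order:
--                 order.append(c)
--     # Phase 3: concept-major counting — for each concept, the number of
--     # formulas whose token list contains it.
--     return {c: sum(c in tokens for tokens in token_lists) for c in order}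
-- ===== Notes on version B (the rewrite author's own statement) =====
-- stated objective: alternative
-- what changed: B transposes the computation: it first materializes the cleaned token list of every formula, derives the global first-appearance order of concepts, and then counts concept-major (for each concept, how many formula token lists contain it) in a dict comprehension, instead of A's formula-major single accumulator with inline two-dict membership-guard branching.
import Mathlib
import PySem

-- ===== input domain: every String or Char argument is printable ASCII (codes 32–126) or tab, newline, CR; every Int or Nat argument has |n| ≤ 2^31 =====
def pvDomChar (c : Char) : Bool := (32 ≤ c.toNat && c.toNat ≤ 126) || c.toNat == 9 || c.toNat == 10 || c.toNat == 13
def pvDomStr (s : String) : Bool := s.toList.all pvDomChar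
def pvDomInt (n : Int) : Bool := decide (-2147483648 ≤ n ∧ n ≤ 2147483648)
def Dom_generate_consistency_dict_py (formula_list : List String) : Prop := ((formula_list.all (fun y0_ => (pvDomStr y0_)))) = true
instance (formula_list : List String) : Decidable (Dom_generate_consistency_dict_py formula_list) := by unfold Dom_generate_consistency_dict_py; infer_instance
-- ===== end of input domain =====

-- B transposes A's formula-major accumulator: it stages the cleaned token lists,
-- derives the global first-appearance order, then counts concept-major (per concept,
-- how many formula token lists contain it); same results, a different algorithm.

-- ===== PORT A =====
-- s.split(sep) for the non-empty literal separators ' | ' / ' & ': split? is always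
-- `some` there (none only for sep = ""), so `.getD []` is never taken.
def pvSplit (s sep : String) : List String := (PySem.Str.split? s sep).getD []

-- term.replace('(','').replace(')','').replace('~','')
def pvClean (t : String) : String :=
  PySem.Str.replace (PySem.Str.replace (PySem.Str.replace t "(" "") ")" "") "~" ""

def generate_consistency_dict_py (formula_list : List String) : List (String × Int) :=
  ((PySem.List.enumerate formula_list 0).foldl
    (fun (concept_dict : PySem.Dict String Int) p =>
      ((pvSplit p.2 " | ").foldl
        (fun (st : PySem.Dict String Int × PySem.Dict String Int) minterm_list =>
          (pvSplit minterm_list " & ").foldl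
            (fun st term =>
              let concept := pvClean term
              if st.2.contains concept then st
              else if st.1.contains concept then
                -- concept_dict[concept] += 1 : the key is present, getD reads the stored value
                (st.1.insert concept (st.1.getD concept 0 + 1), st.2.insert concept 1)
              else
                (st.1.insert concept 1, st.2.insert concept 1)) st)
        (concept_dict, PySem.Dict.empty)).1)
    PySem.Dict.empty).items

-- ===== PORT B =====
def generate_consistency_dict_py_alt (formula_list : List String) : List (String × Int) :=
  let token_lists := formula_list.map (fun formula =>
    (pvSplit formula " | ").flatMap (fun minterm => (pvSplit minterm " & ").map pvClean))
  -- 'order' is a Python list kept duplicate-free by a membership guard = PySem.Set semantics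
  let order : PySem.Set String :=
    token_lists.foldl (fun o tokens => PySem.Set.update o tokens) PySem.Set.empty
  -- the dict comprehension {c: sum(c in tokens for tokens in token_lists) for c in order}
  (order.foldl
    (fun (d : PySem.Dict String Int) c =>
      d.insert c ((token_lists.map (fun tokens => if tokens.contains c then (1 : Int) else 0)).sum))
    PySem.Dict.empty).items

-- ===== PRECONDITION & SPEC =====
def Spec_generate_consistency_dict_py (formula_list : List String) (out : List (String × Int)) : Prop := out = generate_consistency_dict_py_alt formula_list
instance (formula_list : List String) (out : List (String × Int)) : Decidable (Spec_generate_consistency_dict_py formula_list out) := by unfold Spec_generate_consistency_dict_py; infer_instance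

-- ===== CLAIM (what is proved, stated in full; the proofs are below) =====
def Claim_equal_generate_consistency_dict_py : Prop := ∀ (formula_list : List String), Dom_generate_consistency_dict_py formula_list → Spec_generate_consistency_dict_py formula_list (generate_consistency_dict_py formula_list)

-- ===== LEMMAS AND PROOFS =====

-- the common per-concept increment
def pvUpd (d : PySem.Dict String Int) (c : String) : PySem.Dict String Int :=
  d.insert c (d.getD c 0 + 1)

-- the cleaned token list of one formula
def pvTokens (f : String) : List String :=
  (pvSplit f " | ").flatMap (fun minterm => (pvSplit minterm " & ").map pvClean)

-- the first-occurrence sublist of cs relative to an already-seen list s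
def pvNews : List String → List String → List String
  | [], _ => []
  | c :: cs, s => if s.contains c then pvNews cs s else c :: pvNews cs (s ++ [c])

-- A's inner step
def pvStepA (st : PySem.Dict String Int × PySem.Dict String Int) (term : String) :
    PySem.Dict String Int × PySem.Dict String Int :=
  let concept := pvClean term
  if st.2.contains concept then st
  else if st.1.contains concept then
    (st.1.insert concept (st.1.getD concept 0 + 1), st.2.insert concept 1)
  else
    (st.1.insert concept 1, st.2.insert concept 1)

theorem pvGetD_of_not_contains (d : PySem.Dict String Int) (c : String)
    (h : d.contains c = false) : d.getD c 0 = 0 := by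
  simp [PySem.Dict.getD, (PySem.Dict.get?_eq_none_iff_contains d c).2 h]

theorem pvStepA_eq (st : PySem.Dict String Int × PySem.Dict String Int) (term : String) :
    pvStepA st term =
      if st.2.contains (pvClean term) then st
      else (pvUpd st.1 (pvClean term), st.2.insert (pvClean term) 1) := by
  unfold pvStepA pvUpd
  by_cases h2 : st.2.contains (pvClean term) = true
  · simp [h2]
  · simp only [Bool.not_eq_true] at h2
    by_cases h1 : st.1.contains (pvClean term) = true
    · simp [h2, h1]
    · simp only [Bool.not_eq_true] at h1
      simp [h2, h1, pvGetD_of_not_contains _ _ h1]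

theorem pvContains_append_singleton (s : List String) (c x : String) :
    (s ++ [c]).contains x = (x == c || s.contains x) := by
  induction s with
  | nil => simp [Bool.beq_eq_decide_eq]
  | cons a s ih => simp_all; cases x == a <;> cases x == c <;> simp_all

-- A's inner fold, generalized: the concept_dict component equals the pvNews fold,
-- for any seen-dict di whose `contains` agrees with the seen-list s.
theorem pvFoldA (cs : List String) :
    ∀ (d di : PySem.Dict String Int) (s : List String),
    (∀ x, di.contains x = s.contains x) →
    (cs.foldl pvStepA (d, di)).1 = (pvNews (cs.map pvClean) s).foldl pvUpd d := by
  induction cs with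
  | nil => intro d di s _; simp [pvNews]
  | cons c cs ih =>
    intro d di s hs
    rw [List.foldl_cons, pvStepA_eq, hs, List.map_cons]
    by_cases h : s.contains (pvClean c) = true
    · rw [if_pos h]
      show (cs.foldl pvStepA (d, di)).1 = (pvNews (pvClean c :: cs.map pvClean) s).foldl pvUpd d
      rw [pvNews, if_pos h]
      exact ih d di s hs
    · simp only [Bool.not_eq_true] at h
      rw [if_neg (by rw [h]; simp)]
      show (cs.foldl pvStepA (pvUpd d (pvClean c), di.insert (pvClean c) 1)).1
          = (pvNews (pvClean c :: cs.map pvClean) s).foldl pvUpd d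
      rw [pvNews, if_neg (by rw [h]; simp), List.foldl_cons]
      exact ih (pvUpd d (pvClean c)) (di.insert (pvClean c) 1) (s ++ [pvClean c])
        (fun x => by rw [PySem.Dict.contains_insert, hs, pvContains_append_singleton])

-- Set.update appends exactly the pvNews elements
theorem pvUpdate_eq_append_news (cs : List String) :
    ∀ (s : List String), PySem.Set.update s cs = s ++ pvNews cs s := by
  induction cs with
  | nil => intro s; simp [PySem.Set.update_eq_foldl, pvNews]
  | cons c cs ih =>
    intro s
    rw [PySem.Set.update_eq_foldl, List.foldl_cons, ← PySem.Set.update_eq_foldl, pvNews]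
    by_cases h : s.contains c = true
    · rw [if_pos h]
      have hadd : PySem.Set.add s c = s := by
        show (if s.contains c then s else s ++ [c]) = s
        rw [if_pos h]
      rw [hadd, ih]
    · simp only [Bool.not_eq_true] at h
      rw [if_neg (by rw [h]; simp)]
      have hadd : PySem.Set.add s c = s ++ [c] := by
        show (if s.contains c then s else s ++ [c]) = s ++ [c]
        rw [h, if_neg (by simp)]
      rw [hadd, ih]
      simp

theorem pvDedup_eq_news (cs : List String) : PySem.List.dedup cs = pvNews cs [] := by
  rw [PySem.List.dedup_eq_ofList, PySem.Set.ofList_eq_foldl, ← PySem.Set.update_eq_foldl]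
  simpa using pvUpdate_eq_append_news cs []

-- A's per-formula body: the global dict is updated once per first occurrence,
-- i.e. by a pvUpd-fold over the deduplicated token list.
theorem pvBodyA_eq_dedup (cd : PySem.Dict String Int) (f : String) :
    ((pvSplit f " | ").foldl
      (fun st minterm_list => (pvSplit minterm_list " & ").foldl pvStepA st)
      (cd, PySem.Dict.empty)).1
    = (PySem.List.dedup (pvTokens f)).foldl pvUpd cd := by
  rw [← List.foldl_flatMap, pvFoldA _ cd _ [] (fun x => rfl), pvDedup_eq_news, pvTokens,
    show ((pvSplit f " | ").flatMap (fun m => pvSplit m " & ")).map pvClean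
        = (pvSplit f " | ").flatMap (fun m => (pvSplit m " & ").map pvClean) from
      List.map_flatMap]

-- updating a seen-set with dedup cl is updating it with cl
theorem pvUpdate_dedup (s : PySem.Set String) (cl : List String) :
    PySem.Set.update s (PySem.List.dedup cl) = PySem.Set.update s cl := by
  rw [PySem.List.dedup_eq_ofList, PySem.Set.update_eq_append_filter,
    PySem.Set.update_eq_append_filter, PySem.Set.ofList_ofList]

-- A's whole concept stream, flattened with per-formula dedup, seen as one Set build
theorem pvOfList_flatMap_dedup (Ls : List (List String)) :
    ∀ (s : PySem.Set String),
      PySem.Set.update s (Ls.flatMap PySem.List.dedup)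
        = Ls.foldl (fun o cl => PySem.Set.update o cl) s := by
  induction Ls with
  | nil => intro s; simp [PySem.Set.update_eq_foldl]
  | cons cl Ls ih =>
    intro s
    rw [List.flatMap_cons, PySem.Set.update_append, pvUpdate_dedup, List.foldl_cons, ih]

-- counting c in the flattened per-formula-dedup stream counts the formulas containing c
theorem pvCount_flatMap_dedup (Ls : List (List String)) (c : String) :
    (Ls.flatMap PySem.List.dedup).count c = Ls.countP (fun cl => cl.contains c) := by
  induction Ls with
  | nil => simp
  | cons cl Ls ih =>
    rw [List.flatMap_cons, List.count_append, ih, List.countP_cons]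
    by_cases h : c ∈ cl
    · rw [List.count_eq_one_of_mem (PySem.List.nodup_dedup cl)
        ((PySem.List.mem_dedup cl c).2 h)]
      simp [h]
      omega
    · rw [List.count_eq_zero.2 (fun hc => h ((PySem.List.mem_dedup cl c).1 hc))]
      simp [h]

-- A's port, closed form: the Counter of the flattened per-formula-dedup concept stream
theorem pvA_eq (fl : List String) :
    generate_consistency_dict_py fl
      = (PySem.Dict.counter ((fl.map pvTokens).flatMap PySem.List.dedup)).items := by
  unfold generate_consistency_dict_py
  congr 1
  apply Eq.trans (b := (PySem.List.enumerate fl 0).foldl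
      (fun cd p => (PySem.List.dedup (pvTokens p.2)).foldl pvUpd cd) PySem.Dict.empty)
  · congr 1
    funext cd p
    exact pvBodyA_eq_dedup cd p.2
  · rw [← List.foldl_map (f := fun p : Int × String => p.2)
        (g := fun cd f => (PySem.List.dedup (pvTokens f)).foldl pvUpd cd),
      PySem.List.map_snd_enumerate, ← List.foldl_map (g := fun cd cl => (PySem.List.dedup cl).foldl pvUpd cd),
      ← List.foldl_flatMap]
    exact PySem.Dict.foldl_insert_getD_add_one_eq_counter _

-- B's port, closed form: concepts in global first-appearance order, paired with their 0/1 sums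
theorem pvB_eq (fl : List String) :
    generate_consistency_dict_py_alt fl
      = (PySem.Set.ofList ((fl.map pvTokens).flatMap PySem.List.dedup)).map
          (fun c => (c, ((fl.map pvTokens).map
            (fun tokens => if tokens.contains c then (1 : Int) else 0)).sum)) := by
  unfold generate_consistency_dict_py_alt
  dsimp only
  rw [show (fl.map fun formula =>
        (pvSplit formula " | ").flatMap fun minterm => (pvSplit minterm " & ").map pvClean)
      = fl.map pvTokens from rfl]
  rw [← pvOfList_flatMap_dedup, PySem.Set.update_empty]
  rw [PySem.Dict.items_foldl_insert_fresh _ (fun c => c) _ _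
      (fun a _ => PySem.Dict.contains_empty a)
      (by simp [PySem.Set.nodup_ofList])]
  have hempty : (PySem.Dict.empty : PySem.Dict String Int).items = [] := rfl
  simp [hempty]

theorem generate_consistency_dict_py_spec : Claim_equal_generate_consistency_dict_py := by
  intro formula_list _
  unfold Spec_generate_consistency_dict_py
  rw [pvA_eq, pvB_eq, PySem.Dict.items_counter]
  refine List.map_congr_left (fun c hc => ?_)
  rw [pvCount_flatMap_dedup, PySem.List.sum_map_ite_one_zero]
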